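-- pv_equiv track=rewrite | github.com/casmic/AoC | 2021/03/main.py | _calculate_counter
-- ===== SOURCE A (Python) =====
-- def _calculate_counter(diagnostic_report, bit_range):
--     counter = [0 for b in bit_range]
--     for binary_number in diagnostic_report:
--         counter_position = 0
--         for position in bit_range:
--             if binary_number[position] == "1":
--                 counter[counter_position] += 1
--             else:
--                 counter[counter_position] -= 1
--             counter_position += 1
--     return counter
-- ===== SOURCE B (Python) =====
-- def _calculate_counter(diagnostic_report, bit_range):
--     def row(bn):
--         return [1 if bn[p] == "1" else -1 for p in bit_range]
--
--     def solve(lo, hi):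
--         if hi - lo <= 1:
--             return row(diagnostic_report[lo])
--         mid = (lo + hi) // 2
--         return [x + y for x, y in zip(solve(lo, mid), solve(mid, hi))]
--
--     if not diagnostic_report:
--         return [0 for _ in bit_range]
--     return solve(0, len(diagnostic_report))
-- ===== Notes on version B (the rewrite author's own statement) =====
-- stated objective: alternative
-- what changed: Replaces A's threaded +1/-1 accumulator over two nested loops with a divide-and-conquer reduction: each row is mapped to a +-1 vector and halves of the report are merged by elementwise vector addition.
import Mathlib
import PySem

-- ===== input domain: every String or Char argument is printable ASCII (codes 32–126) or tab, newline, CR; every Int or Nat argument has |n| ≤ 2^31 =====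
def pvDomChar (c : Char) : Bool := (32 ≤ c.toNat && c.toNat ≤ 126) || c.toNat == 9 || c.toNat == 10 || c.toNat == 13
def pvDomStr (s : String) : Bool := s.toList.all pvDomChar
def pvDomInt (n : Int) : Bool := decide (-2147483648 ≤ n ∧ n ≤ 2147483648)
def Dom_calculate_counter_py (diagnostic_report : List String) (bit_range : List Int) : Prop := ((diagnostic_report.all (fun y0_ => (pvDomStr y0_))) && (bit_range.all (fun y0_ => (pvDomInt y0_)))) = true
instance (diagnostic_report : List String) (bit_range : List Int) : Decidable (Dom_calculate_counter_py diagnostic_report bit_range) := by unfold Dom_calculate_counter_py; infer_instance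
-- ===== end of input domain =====

-- B replaces A's +1/-1 accumulator threaded through two nested loops by a
-- divide-and-conquer reduction: each row maps to a ±1 vector, halves merge by
-- elementwise vector addition (alternative decomposition, same cost).

-- ===== PORT A =====
-- one step of A's inner loop: state (counter_position, counter);
-- 'if binary_number[position] == "1": counter[cp] += 1 else: counter[cp] -= 1; cp += 1'
def pvStepA (binary_number : String) (st : Nat × List Int) (position : Int) : Nat × List Int :=
  if PySem.Str.pyGet? binary_number position = some '1' then
    (st.1 + 1, st.2.modify st.1 (fun c => c + 1))
  else
    (st.1 + 1, st.2.modify st.1 (fun c => c - 1))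

-- literal transliteration: counter = [0 for b in bit_range]; outer loop over rows,
-- inner loop over bit_range threading counter_position.
def calculate_counter_py (diagnostic_report : List String) (bit_range : List Int) : List Int :=
  let counter0 : List Int := bit_range.map (fun _ => 0)
  diagnostic_report.foldl
    (fun counter binary_number =>
      (bit_range.foldl (pvStepA binary_number) (0, counter)).2)
    counter0

-- ===== PORT B =====
-- Source B's row(bn): [1 if bn[p] == "1" else -1 for p in bit_range]
def pvRow (bn : String) (bit_range : List Int) : List Int :=
  bit_range.map (fun p => if PySem.Str.pyGet? bn p = some '1' then (1 : Int) else -1)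

-- Source B's solve(lo, hi); diagnostic_report[lo] is always in range on reachable
-- calls (0 ≤ lo < len), so getD with a dummy default is exact there.  The fuel
-- parameter (≥ hi - lo at every call) only makes the recursion structural.
def pvSolve (fuel : Nat) (report : List String) (bit_range : List Int) (lo hi : Nat) : List Int :=
  match fuel with
  | 0 => pvRow (report.getD lo "") bit_range
  | fuel + 1 =>
    if hi ≤ lo + 1 then pvRow (report.getD lo "") bit_range
    else
      List.zipWith (· + ·)
        (pvSolve fuel report bit_range lo ((lo + hi) / 2))
        (pvSolve fuel report bit_range ((lo + hi) / 2) hi)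

-- literal transliteration of Source B's body
def calculate_counter_py_alt (diagnostic_report : List String) (bit_range : List Int) : List Int :=
  if diagnostic_report = [] then bit_range.map (fun _ => 0)
  else pvSolve diagnostic_report.length diagnostic_report bit_range 0 diagnostic_report.length

-- ===== PRECONDITION & SPEC =====
-- Pre_ excludes exactly the inputs where Python A raises IndexError: some position in
-- bit_range out of range (Python negative-index rule) for some string of the report.
def Pre_calculate_counter_py (diagnostic_report : List String) (bit_range : List Int) : Prop :=
  ∀ bn ∈ diagnostic_report, ∀ p ∈ bit_range, PySem.Raise.InRange bn.toList.length p
instance (diagnostic_report : List String) (bit_range : List Int) : Decidable (Pre_calculate_counter_py diagnostic_report bit_range) := by unfold Pre_calculate_counter_py; infer_instance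

def pvWitness_calculate_counter_py : List String × List Int := (["101", "011"], [0, 1, 2])

def Spec_calculate_counter_py (diagnostic_report : List String) (bit_range : List Int) (out : List Int) : Prop := out = calculate_counter_py_alt diagnostic_report bit_range
instance (diagnostic_report : List String) (bit_range : List Int) (out : List Int) : Decidable (Spec_calculate_counter_py diagnostic_report bit_range out) := by unfold Spec_calculate_counter_py; infer_instance

-- ===== CLAIM (what is proved, stated in full; the proofs are below) =====
def Claim_equal_calculate_counter_py : Prop := ∀ (diagnostic_report : List String) (bit_range : List Int), Dom_calculate_counter_py diagnostic_report bit_range → Pre_calculate_counter_py diagnostic_report bit_range → Spec_calculate_counter_py diagnostic_report bit_range (calculate_counter_py diagnostic_report bit_range)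

-- ===== LEMMAS AND PROOFS =====

-- per-cell delta of A's inner loop (= one entry of B's row vector)
def pvDelta (bn : String) (p : Int) : Int :=
  if PySem.Str.pyGet? bn p = some '1' then 1 else -1

-- sum of deltas down column p over a block of rows
def pvColSum (rows : List String) (p : Int) : Int :=
  (rows.map (fun bn => pvDelta bn p)).sum

theorem pv_modify_append (pre : List Int) (x : Int) (t : List Int) (f : Int → Int) :
    (pre ++ x :: t).modify pre.length f = pre ++ f x :: t := by
  induction pre with
  | nil => simp [List.modify]
  | cons a l ih => simpa [List.modify] using ih

-- A's inner loop, started past an untouched prefix, adds pvDelta pointwise.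
theorem pv_inner (bn : String) :
    ∀ (br : List Int) (g : Int → Int) (pre : List Int),
      (br.foldl (pvStepA bn) (pre.length, pre ++ br.map g)).2
        = pre ++ br.map (fun p => g p + pvDelta bn p) := by
  intro br
  induction br with
  | nil => intro g pre; simp
  | cons p ps ih =>
    intro g pre
    have hstep : pvStepA bn (pre.length, pre ++ (p :: ps).map g) p
        = (pre.length + 1, pre ++ (g p + pvDelta bn p) :: ps.map g) := by
      by_cases h : PySem.List.pyGet? bn.toList p = some '1' <;>
        simp [pvStepA, pvDelta, h, pv_modify_append, sub_eq_add_neg]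
    have hlen : pre.length + 1 = (pre ++ [g p + pvDelta bn p]).length := by simp
    have hsplit : pre ++ (g p + pvDelta bn p) :: ps.map g
        = (pre ++ [g p + pvDelta bn p]) ++ ps.map g := by simp
    rw [List.foldl_cons, hstep, hsplit, hlen, ih g (pre ++ [g p + pvDelta bn p])]
    simp

-- outer loop: if the counter is br.map g, it stays a map over br.
theorem pv_outer (rows : List String) :
    ∀ (br : List Int) (g : Int → Int),
      rows.foldl (fun counter bn => (br.foldl (pvStepA bn) (0, counter)).2) (br.map g)
        = br.map (fun p => rows.foldl (fun a bn => a + pvDelta bn p) (g p)) := by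
  induction rows with
  | nil => intro br g; simp
  | cons bn rest ih =>
    intro br g
    have h0 := pv_inner bn br g []
    simp only [List.nil_append, List.length_nil] at h0
    rw [List.foldl_cons, h0, ih br (fun p => g p + pvDelta bn p)]
    simp

theorem pv_foldl_colSum (p : Int) (rows : List String) : ∀ (c : Int),
    rows.foldl (fun a bn => a + pvDelta bn p) c = c + pvColSum rows p := by
  induction rows with
  | nil => intro c; simp [pvColSum]
  | cons bn rest ih =>
    intro c
    rw [List.foldl_cons, ih]
    simp [pvColSum]
    ring

theorem pv_zip_map (f g : Int → Int) : ∀ (br : List Int),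
    List.zipWith (· + ·) (br.map f) (br.map g) = br.map (fun p => f p + g p) := by
  intro br
  induction br with
  | nil => simp
  | cons a l ih => simp [ih]

theorem pvColSum_append (r s : List String) (p : Int) :
    pvColSum (r ++ s) p = pvColSum r p + pvColSum s p := by
  simp [pvColSum]

-- a one-row block: base case of solve
theorem pv_solve_base (report : List String) (br : List Int) (lo : Nat)
    (hlt : lo < report.length) :
    pvRow (report.getD lo "") br
      = br.map (fun p => pvColSum ((report.drop lo).take 1) p) := by
  have hdlen : 0 < (report.drop lo).length := by simp; omega
  obtain ⟨x, t, hx⟩ := List.exists_cons_of_ne_nil (List.ne_nil_of_length_pos hdlen)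
  have hget : report.getD lo "" = x := by
    have h9 : report[lo]? = some x := by
      rw [← List.head?_drop, hx]; rfl
    simp [List.getD_eq_getElem?_getD, h9]
  rw [hget, hx]
  simp [pvRow, pvColSum, pvDelta]

-- B's solve(lo, hi) computes the per-column delta sums of the row block [lo, hi).
theorem pv_solve_eq (report : List String) (br : List Int) :
    ∀ (fuel lo hi : Nat), hi - lo ≤ fuel + 1 → lo < hi → hi ≤ report.length →
      pvSolve fuel report br lo hi
        = br.map (fun p => pvColSum ((report.drop lo).take (hi - lo)) p) := by
  intro fuel
  induction fuel with
  | zero =>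
    intro lo hi hn hlt hle
    have hhi : hi = lo + 1 := by omega
    subst hhi
    rw [pvSolve, pv_solve_base report br lo (by omega)]
    simp
  | succ f ih =>
    intro lo hi hn hlt hle
    by_cases h1 : hi ≤ lo + 1
    · have hhi : hi = lo + 1 := by omega
      subst hhi
      rw [pvSolve]
      simp only [if_pos h1]
      rw [pv_solve_base report br lo (by omega)]
      simp
    · have hmid1 : lo < (lo + hi) / 2 := by omega
      have hmid2 : (lo + hi) / 2 < hi := by omega
      rw [pvSolve]
      simp only [if_neg h1]
      rw [ih lo ((lo + hi) / 2) (by omega) hmid1 (by omega),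
          ih ((lo + hi) / 2) hi (by omega) hmid2 hle,
          pv_zip_map]
      refine List.map_congr_left ?_
      intro p _
      have hsplit : (report.drop lo).take (hi - lo)
          = (report.drop lo).take ((lo + hi) / 2 - lo)
            ++ (report.drop ((lo + hi) / 2)).take (hi - (lo + hi) / 2) := by
        have h2 : hi - lo = ((lo + hi) / 2 - lo) + (hi - (lo + hi) / 2) := by omega
        rw [h2, List.take_add, List.drop_drop]
        congr 3
        omega
      rw [hsplit, pvColSum_append]

-- ===== VERDICT (by name: the statement is the Claim_ definition above) =====
theorem calculate_counter_py_spec : Claim_equal_calculate_counter_py := by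
  intro report br _ _
  unfold Spec_calculate_counter_py calculate_counter_py calculate_counter_py_alt
  rw [pv_outer report br (fun _ => 0)]
  by_cases hre : report = []
  · subst hre; simp
  · rw [if_neg hre,
        pv_solve_eq report br report.length 0 report.length (by omega)
          (List.length_pos_of_ne_nil hre) le_rfl]
    refine List.map_congr_left ?_
    intro p _
    rw [pv_foldl_colSum]
    simp
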